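-- pv_equiv track=rewrite | github.com/ferruzzi/scrapheap | projects/statsd-vs-otel/project.py | back_to_dict
-- ===== SOURCE A (Python) =====
-- def back_to_dict(obj, master):
--     ret = {}
--     for stat in obj:
--         typ = [typ for typ in master.keys() if stat in master[typ]][0]
--         ret[typ] = ret.get(typ, []) + [stat]
--     for typ in ret:
--         ret[typ].sort()
--     return ret
-- ===== SOURCE B (Python) =====
-- def back_to_dict(obj, master):
--     # Invert master once: stat -> first type (in master's insertion order) containing it.
--     owner = {}
--     for typ, stats in master.items():
--         for s in stats:
--             owner.setdefault(s, typ)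
--     # Keys in order of first appearance in obj (matches A's dict insertion order).
--     ret = {}
--     for stat in obj:
--         ret.setdefault(owner[stat], [])
--     # One global sort; filling buckets from the sorted stream keeps every bucket sorted.
--     for stat in sorted(obj):
--         ret[owner[stat]].append(stat)
--     return ret
-- ===== Notes on version B (the rewrite author's own statement) =====
-- stated objective: faster
-- what changed: B inverts master once into a stat->type dict (removing A's per-stat scan over all of master), fixes the key order with a cheap pass over obj, and fills all buckets from one global sorted(obj) stream instead of sorting each bucket separately.
import Mathlib
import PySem

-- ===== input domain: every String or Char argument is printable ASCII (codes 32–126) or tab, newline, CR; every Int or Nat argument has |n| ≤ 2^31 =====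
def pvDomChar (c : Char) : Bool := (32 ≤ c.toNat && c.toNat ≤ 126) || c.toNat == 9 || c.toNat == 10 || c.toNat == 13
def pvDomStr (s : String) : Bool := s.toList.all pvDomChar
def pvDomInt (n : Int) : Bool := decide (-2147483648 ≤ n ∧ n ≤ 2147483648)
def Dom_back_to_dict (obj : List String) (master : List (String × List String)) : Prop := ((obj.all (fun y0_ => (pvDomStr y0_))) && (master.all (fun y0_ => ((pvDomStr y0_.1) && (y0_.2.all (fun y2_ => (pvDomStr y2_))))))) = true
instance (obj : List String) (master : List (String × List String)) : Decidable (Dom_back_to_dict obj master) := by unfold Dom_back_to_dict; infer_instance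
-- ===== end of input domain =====

-- B replaces A's per-stat scan over all of master by an inverted stat→type index built once,
-- and replaces A's per-bucket sorts by one global sort of obj whose stream fills the buckets.
-- A mutates nothing observable; equivalence is about the return value.

-- ===== PORT A =====
def back_to_dict (obj : List String) (master : List (String × List String)) : List (String × List String) :=
  -- ret = {}; for stat in obj: typ = [typ for typ in master.keys() if stat in master[typ]][0]; ret[typ] = ret.get(typ, []) + [stat]
  -- (the [0] raises IndexError when the inner list is empty: that input is excluded by Pre_, the port skips the stat there)
  let ret : PySem.Dict String (List String) :=
    obj.foldl (fun ret stat =>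
      match (((PySem.Dict.mk master).keys).filter
              (fun typ => ((PySem.Dict.mk master).getD typ []).contains stat)).head? with
      | some typ => ret.insert typ (ret.getD typ [] ++ [stat])
      | none => ret) PySem.Dict.empty
  -- for typ in ret: ret[typ].sort()
  ret.items.map (fun p => (p.1, PySem.List.sorted p.2 (fun x => x) false))

-- ===== PORT B =====
def back_to_dict_alt (obj : List String) (master : List (String × List String)) : List (String × List String) :=
  -- owner = {}; for typ, stats in master.items(): for s in stats: owner.setdefault(s, typ)
  let owner : PySem.Dict String String :=
    master.foldl (fun o p => p.2.foldl (fun o s => o.setdefault s p.1) o) PySem.Dict.empty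
  -- ret = {}; for stat in obj: ret.setdefault(owner[stat], [])
  -- (owner[stat] raises KeyError when stat has no owner: excluded by Pre_, the port skips the stat there)
  let ret0 : PySem.Dict String (List String) :=
    obj.foldl (fun r stat =>
      match owner.get? stat with
      | some t => r.setdefault t []
      | none => r) PySem.Dict.empty
  -- for stat in sorted(obj): ret[owner[stat]].append(stat)
  let ret : PySem.Dict String (List String) :=
    (PySem.List.sorted obj (fun x => x) false).foldl (fun r stat =>
      match owner.get? stat with
      | some t => r.insert t (r.getD t [] ++ [stat])
      | none => r) ret0
  ret.items

-- ===== PRECONDITION & SPEC =====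
-- Pre_ excludes (a) inputs where A raises: a stat in obj contained in no master value makes A's
-- `[...][0]` raise IndexError (B raises KeyError there); (b) assoc lists with duplicate keys,
-- which do not represent any Python dict (the Python argument `master` is a dict).
def Pre_back_to_dict (obj : List String) (master : List (String × List String)) : Prop :=
  (master.map Prod.fst).Nodup ∧ ∀ s ∈ obj, ∃ p ∈ master, s ∈ p.2
instance (obj : List String) (master : List (String × List String)) : Decidable (Pre_back_to_dict obj master) := by unfold Pre_back_to_dict; infer_instance

def pvWitness_back_to_dict : List String × (List (String × List String)) :=
  (["b", "a", "c", "a"], [("t1", ["a", "b"]), ("t2", ["c"])])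

def Spec_back_to_dict (obj : List String) (master : List (String × List String)) (out : List (String × List String)) : Prop := out = back_to_dict_alt obj master
instance (obj : List String) (master : List (String × List String)) (out : List (String × List String)) : Decidable (Spec_back_to_dict obj master out) := by unfold Spec_back_to_dict; infer_instance

-- ===== CLAIM (what is proved, stated in full; the proofs are below) =====
def Claim_equal_back_to_dict : Prop := ∀ (obj : List String) (master : List (String × List String)), Dom_back_to_dict obj master → Pre_back_to_dict obj master → Spec_back_to_dict obj master (back_to_dict obj master)

-- ===== LEMMAS AND PROOFS =====

def fOwn (master : List (String × List String)) (s : String) : Option String :=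
  (master.find? (fun p => p.2.contains s)).map Prod.fst

theorem ownA (s : String) : ∀ (master : List (String × List String)),
    (master.map Prod.fst).Nodup →
    (((PySem.Dict.mk master).keys).filter
      (fun typ => ((PySem.Dict.mk master).getD typ []).contains s)).head? = fOwn master s := by
  intro master
  induction master with
  | nil => intro _; rfl
  | cons p ms ih =>
    intro hnd
    have hnd' : (ms.map Prod.fst).Nodup := (List.nodup_cons.mp hnd).2
    have hpc : p.1 ∉ ms.map Prod.fst := (List.nodup_cons.mp hnd).1
    have hkeys : (PySem.Dict.mk (p :: ms)).keys = p.1 :: ms.map Prod.fst := by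
      simp [PySem.Dict.keys]
    have hgetd_self : (PySem.Dict.mk (p :: ms)).getD p.1 [] = p.2 := by
      simp [PySem.Dict.getD, PySem.Dict.get?]
    have hgetd_ne : ∀ typ, typ ≠ p.1 → (PySem.Dict.mk (p :: ms)).getD typ []
        = (PySem.Dict.mk ms).getD typ [] := by
      intro typ hne
      simp [PySem.Dict.getD, PySem.Dict.get?, Ne.symm hne]
    rw [hkeys]
    by_cases hps : s ∈ p.2
    · have : ((PySem.Dict.mk (p :: ms)).getD p.1 []).contains s = true := by
        rw [hgetd_self]; simpa using hps
      simp only [List.filter_cons, this, if_pos]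
      simp [fOwn, hps]
    · have h1 : ((PySem.Dict.mk (p :: ms)).getD p.1 []).contains s = false := by
        rw [hgetd_self]; simpa using hps
      simp only [List.filter_cons, h1]
      have h2 : (ms.map Prod.fst).filter
          (fun typ => ((PySem.Dict.mk (p :: ms)).getD typ []).contains s)
          = (ms.map Prod.fst).filter
          (fun typ => ((PySem.Dict.mk ms).getD typ []).contains s) := by
        apply List.filter_congr
        intro typ htyp
        rw [hgetd_ne typ (by intro h; exact hpc (h ▸ htyp))]
      have h3 : (PySem.Dict.mk ms).keys = ms.map Prod.fst := by simp [PySem.Dict.keys]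
      have h4 : fOwn (p :: ms) s = fOwn ms s := by
        simp [fOwn, hps]
      rw [if_neg (by simp), h2, h4, ← h3]
      exact ih hnd'

theorem get?_setdefault {ν : Type} (o : PySem.Dict String ν) (k x : String) (v : ν) :
    (o.setdefault k v).get? x = (o.get? x).orElse (fun _ => if k == x then some v else none) := by
  unfold PySem.Dict.setdefault
  split
  · rename_i hc
    cases hx : o.get? x with
    | some w => rfl
    | none =>
      have hkx : ¬ (k == x) = true := by
        intro h
        have : k = x := by simpa using h
        subst this
        rw [PySem.Dict.contains_eq_isSome_get?, hx] at hc
        simp at hc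
      simp [Option.orElse, hkx]
  · rename_i hc
    show (PySem.Dict.get? ⟨o.items ++ [(k, v)]⟩ x) = _
    unfold PySem.Dict.get?
    rw [List.find?_append]
    cases hx : List.find? (fun p => p.1 == x) o.items with
    | some w => rfl
    | none =>
      simp only [Option.none_or, Option.map_none, Option.orElse_none, List.find?]
      split <;> simp_all [BEq.comm]

theorem innerB {ν : Type} (vs : List String) : ∀ (o : PySem.Dict String ν) (t : ν) (x : String),
    (vs.foldl (fun o s => o.setdefault s t) o).get? x
      = (o.get? x).orElse (fun _ => if vs.contains x then some t else none) := by
  induction vs with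
  | nil => intro o t x; cases h : o.get? x <;> simp [h, Option.orElse]
  | cons s vs ih =>
    intro o t x
    simp only [List.foldl_cons]
    rw [ih]
    rw [get?_setdefault]
    cases h : o.get? x with
    | some w => rfl
    | none =>
      simp only [Option.orElse_none]
      by_cases hsx : s = x
      · subst hsx
        simp
      · have : (s == x) = false := by simp [hsx]
        simp [this, Ne.symm hsx]

theorem outerB (fOwn : List (String × List String) → String → Option String)
    (hf : ∀ m s, fOwn m s = (m.find? (fun p => p.2.contains s)).map Prod.fst)
    (master : List (String × List String)) : ∀ (o : PySem.Dict String String) (x : String),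
    (master.foldl (fun o p => p.2.foldl (fun o s => o.setdefault s p.1) o) o).get? x
      = (o.get? x).orElse (fun _ => fOwn master x) := by
  induction master with
  | nil => intro o x; cases h : o.get? x <;> simp [h, hf, Option.orElse]
  | cons p ms ih =>
    intro o x
    simp only [List.foldl_cons]
    rw [ih, innerB]
    simp only [hf, List.find?_cons]
    cases h : o.get? x with
    | some w => rfl
    | none =>
      simp only [Option.orElse_none]
      by_cases hm : x ∈ p.2 <;> simp [hm]

theorem dedup_append_singleton (L : List String) (x : String) :
    PySem.List.dedup (L ++ [x]) = if x ∈ L then PySem.List.dedup L else PySem.List.dedup L ++ [x] := by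
  show PySem.Set.ofList (L ++ [x]) = _
  unfold PySem.Set.ofList
  rw [List.foldl_append]
  show (PySem.Set.ofList L).add x = _
  unfold PySem.Set.add
  by_cases hx : x ∈ L
  · rw [if_pos, if_pos hx]
    · rfl
    · have : x ∈ PySem.Set.ofList L := (PySem.Set.mem_ofList L x).mpr hx
      simpa [List.contains_iff_mem] using this
  · rw [if_neg, if_neg hx]
    · rfl
    · intro h
      exact hx ((PySem.Set.mem_ofList L x).mp (by simpa [List.contains_iff_mem] using h))

theorem keys_shape (K : List String) (v : String → List String) :
    (K.map (fun k => (k, v k))).map Prod.fst = K := by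
  rw [List.map_map]; exact List.map_id'' (fun k => rfl) K

theorem groupA (f : String → Option String) (g : String → String) :
    ∀ (obj : List String), (∀ s ∈ obj, f s = some (g s)) →
    (obj.foldl (fun r s =>
        match f s with
        | some t => r.insert t (r.getD t [] ++ [s])
        | none => r) PySem.Dict.empty).items
      = (PySem.List.dedup (obj.map g)).map (fun k => (k, obj.filter (fun s => g s == k))) := by
  intro obj
  induction obj using List.reverseRecOn with
  | nil => intro _; rfl
  | append_singleton t s ih =>
    intro h
    have ht : ∀ s' ∈ t, f s' = some (g s') := fun s' hs' => h s' (List.mem_append_left _ hs')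
    have hs : f s = some (g s) := h s (List.mem_append_right _ (List.mem_singleton_self s))
    rw [List.foldl_append]
    simp only [List.foldl_cons, List.foldl_nil, hs]
    set d := t.foldl (fun r s =>
        match f s with
        | some t' => r.insert t' (r.getD t' [] ++ [s])
        | none => r) PySem.Dict.empty with hd
    have hitems : d.items = (PySem.List.dedup (t.map g)).map (fun k => (k, t.filter (fun s' => g s' == k))) := ih ht
    have hkeys : d.keys = PySem.List.dedup (t.map g) := by
      show d.items.map Prod.fst = _
      rw [hitems, keys_shape]
    have hknodup : d.keys.Nodup := by rw [hkeys]; exact PySem.List.nodup_dedup _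
    simp only [List.map_append, List.map_cons, List.map_nil]
    rw [dedup_append_singleton]
    by_cases hmem : g s ∈ t.map g
    · -- key already present: in-place update
      have hcont : d.contains (g s) = true := by
        rw [PySem.Dict.contains_eq_decide_mem_keys, hkeys]
        simp [hmem]
      have hgetd : d.getD (g s) [] = t.filter (fun s' => g s' == g s) := by
        have hm : ((g s), t.filter (fun s' => g s' == g s)) ∈ d.items := by
          rw [hitems]
          exact List.mem_map_of_mem (by rwa [PySem.List.mem_dedup])
        exact PySem.Dict.getD_of_mem_items d hm hknodup []
      rw [PySem.Dict.items_insert_of_contains d _ hcont, hitems, hgetd, if_pos hmem, List.map_map]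
      apply List.map_congr_left
      intro k hk
      by_cases hks : k = g s
      · subst hks
        simp [List.filter_append]
      · have : (k == g s) = false := by simpa using hks
        simp only [Function.comp_apply, this]
        have : (g s == k) = false := by simpa using (Ne.symm hks)
        simp [List.filter_append, this]
    · -- new key: appended at the end
      have hcont : d.contains (g s) = false := by
        rw [PySem.Dict.contains_eq_decide_mem_keys, hkeys]
        simp [hmem]
      have hgetd : d.getD (g s) [] = [] := PySem.Dict.getD_of_not_contains d [] hcont
      have hfilt_nil : t.filter (fun s' => g s' == g s) = [] := by
        rw [List.filter_eq_nil_iff]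
        intro s' hs' hgs
        have : g s' = g s := by simpa using hgs
        exact hmem (this ▸ List.mem_map_of_mem hs')
      rw [PySem.Dict.items_insert_of_not_contains d _ hcont, hitems, hgetd, if_neg hmem,
          List.map_append]
      congr 1
      · apply List.map_congr_left
        intro k hk
        have hkt : k ∈ t.map g := by rwa [PySem.List.mem_dedup] at hk
        have : (g s == k) = false := by
          simp only [beq_eq_false_iff_ne, ne_eq]
          intro he; exact hmem (he ▸ hkt)
        simp [List.filter_append, this]
      · simp [List.filter_append, hfilt_nil]

theorem groupB0 (f : String → Option String) (g : String → String) :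
    ∀ (obj : List String), (∀ s ∈ obj, f s = some (g s)) →
    (obj.foldl (fun r s =>
        match f s with
        | some t => r.setdefault t []
        | none => r) PySem.Dict.empty).items
      = (PySem.List.dedup (obj.map g)).map (fun k => (k, ([] : List String))) := by
  intro obj
  induction obj using List.reverseRecOn with
  | nil => intro _; rfl
  | append_singleton t s ih =>
    intro h
    have ht : ∀ s' ∈ t, f s' = some (g s') := fun s' hs' => h s' (List.mem_append_left _ hs')
    have hs : f s = some (g s) := h s (List.mem_append_right _ (List.mem_singleton_self s))
    rw [List.foldl_append]
    simp only [List.foldl_cons, List.foldl_nil, hs]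
    set d := t.foldl (fun r s =>
        match f s with
        | some t' => r.setdefault t' []
        | none => r) PySem.Dict.empty with hd
    have hitems : d.items = (PySem.List.dedup (t.map g)).map (fun k => (k, ([] : List String))) := ih ht
    have hkeys : d.keys = PySem.List.dedup (t.map g) := by
      show d.items.map Prod.fst = _
      rw [hitems, keys_shape]
    simp only [List.map_append, List.map_cons, List.map_nil]
    rw [dedup_append_singleton]
    unfold PySem.Dict.setdefault
    by_cases hmem : g s ∈ t.map g
    · have hcont : d.contains (g s) = true := by
        rw [PySem.Dict.contains_eq_decide_mem_keys, hkeys]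
        simp [hmem]
      rw [if_pos hcont, if_pos hmem, hitems]
    · have hcont : d.contains (g s) = false := by
        rw [PySem.Dict.contains_eq_decide_mem_keys, hkeys]
        simp [hmem]
      rw [if_neg (by simp [hcont]), if_neg hmem]
      show d.items ++ [(g s, [])] = _
      rw [hitems, List.map_append, List.map_singleton]

theorem fillB (f : String → Option String) (g : String → String) (K : List String) (hK : K.Nodup) :
    ∀ (L : List String) (d : PySem.Dict String (List String)) (v : String → List String),
      (∀ s ∈ L, f s = some (g s)) → (∀ s ∈ L, g s ∈ K) →
      d.items = K.map (fun k => (k, v k)) →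
      (L.foldl (fun r s =>
          match f s with
          | some t => r.insert t (r.getD t [] ++ [s])
          | none => r) d).items
        = K.map (fun k => (k, v k ++ L.filter (fun s => g s == k))) := by
  intro L
  induction L with
  | nil =>
    intro d v _ _ hitems
    simpa using hitems
  | cons s L ih =>
    intro d v h hg hitems
    have hkeys : d.keys = K := by
      show d.items.map Prod.fst = _
      rw [hitems, keys_shape]
    have hknodup : d.keys.Nodup := by rw [hkeys]; exact hK
    have hsK : g s ∈ K := hg s List.mem_cons_self
    have hcont : d.contains (g s) = true := by
      rw [PySem.Dict.contains_eq_decide_mem_keys, hkeys]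
      simp [hsK]
    have hm : ((g s), v (g s)) ∈ d.items := by
      rw [hitems]; exact List.mem_map_of_mem hsK
    have hgetd : d.getD (g s) [] = v (g s) := PySem.Dict.getD_of_mem_items d hm hknodup []
    simp only [List.foldl_cons, h s List.mem_cons_self]
    rw [ih (d.insert (g s) (d.getD (g s) [] ++ [s]))
        (fun k => if k = g s then v k ++ [s] else v k)
        (fun s' hs' => h s' (List.mem_cons_of_mem _ hs'))
        (fun s' hs' => hg s' (List.mem_cons_of_mem _ hs'))]
    · apply List.map_congr_left
      intro k hk
      by_cases hks : k = g s
      · subst hks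
        simp
      · have : (g s == k) = false := by simpa using (Ne.symm hks)
        simp [this, hks]
    · rw [PySem.Dict.items_insert_of_contains d _ hcont, hitems, hgetd, List.map_map]
      apply List.map_congr_left
      intro k hk
      by_cases hks : k = g s
      · subst hks; simp
      · have : (k == g s) = false := by simpa using hks
        simp [hks]

theorem sorted_filter (obj : List String) (p : String → Bool) :
    PySem.List.sorted (obj.filter p) (fun x => x) false
      = (PySem.List.sorted obj (fun x => x) false).filter p := by
  apply PySem.List.sorted_id_eq_of_perm_of_pairwise
  · exact ((PySem.List.sorted_perm obj (fun x => x) false).filter p)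
  · exact List.Pairwise.filter p (PySem.List.sorted_pairwise obj (fun x => x))

-- B's owner dict computes fOwn
theorem ownerB (master : List (String × List String)) (x : String) :
    (master.foldl (fun o p => p.2.foldl (fun o s => o.setdefault s p.1) o) PySem.Dict.empty).get? x
      = fOwn master x := by
  rw [outerB fOwn (fun m s => rfl) master PySem.Dict.empty x]
  simp [PySem.Dict.get?_empty]

-- ===== VERDICT (by name: the statement is the Claim_ definition above) =====
theorem back_to_dict_spec : Claim_equal_back_to_dict := by
  intro obj master _ hpre
  obtain ⟨hnd, hown⟩ := hpre
  have hsome : ∀ s ∈ obj, fOwn master s = some ((fOwn master s).getD "") := by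
    intro s hs
    obtain ⟨p, hp, hsp⟩ := hown s hs
    have hiss : (master.find? (fun p => p.2.contains s)).isSome := by
      rw [List.find?_isSome]
      exact ⟨p, hp, by simpa using hsp⟩
    cases hfind : master.find? (fun p => p.2.contains s) with
    | none => rw [hfind] at hiss; simp at hiss
    | some q => simp only [fOwn, hfind, Option.map_some, Option.getD_some]
  set g : String → String := fun s => (fOwn master s).getD "" with hg
  show back_to_dict obj master = back_to_dict_alt obj master
  unfold back_to_dict back_to_dict_alt
  have hstepA : (fun (ret : PySem.Dict String (List String)) stat =>
      match (((PySem.Dict.mk master).keys).filter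
              (fun typ => ((PySem.Dict.mk master).getD typ []).contains stat)).head? with
      | some typ => ret.insert typ (ret.getD typ [] ++ [stat])
      | none => ret)
      = (fun (r : PySem.Dict String (List String)) s =>
      match fOwn master s with
      | some t => r.insert t (r.getD t [] ++ [s])
      | none => r) := by
    funext r s
    rw [ownA s master hnd]
  have hstepB : (fun (r : PySem.Dict String (List String)) stat =>
      match (master.foldl (fun o p => p.2.foldl (fun o s => o.setdefault s p.1) o) PySem.Dict.empty).get? stat with
      | some t => r.insert t (r.getD t [] ++ [stat])
      | none => r)
      = (fun (r : PySem.Dict String (List String)) s =>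
      match fOwn master s with
      | some t => r.insert t (r.getD t [] ++ [s])
      | none => r) := by
    funext r s
    rw [ownerB master s]
  have hstepB0 : (fun (r : PySem.Dict String (List String)) stat =>
      match (master.foldl (fun o p => p.2.foldl (fun o s => o.setdefault s p.1) o) PySem.Dict.empty).get? stat with
      | some t => r.setdefault t []
      | none => r)
      = (fun (r : PySem.Dict String (List String)) s =>
      match fOwn master s with
      | some t => r.setdefault t []
      | none => r) := by
    funext r s
    rw [ownerB master s]
  simp only [hstepA, hstepB, hstepB0]
  -- A's side
  rw [groupA (fOwn master) g obj hsome]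
  -- B's side
  rw [fillB (fOwn master) g (PySem.List.dedup (obj.map g)) (PySem.List.nodup_dedup _)
      (PySem.List.sorted obj (fun x => x) false) _ (fun _ => [])
      (fun s hs => hsome s ((PySem.List.mem_sorted obj (fun x => x) false s).mp hs))
      (fun s hs => (PySem.List.mem_dedup _ _).mpr
        (List.mem_map_of_mem ((PySem.List.mem_sorted obj (fun x => x) false s).mp hs)))
      (groupB0 (fOwn master) g obj hsome)]
  rw [List.map_map]
  apply List.map_congr_left
  intro k hk
  simp only [Function.comp_apply, List.nil_append]
  rw [sorted_filter]
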